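-- pv_equiv track=rewrite | github.com/ACL2022NER/CrossNER | model/latticeonlstm.py | convert_forward_gaz_to_backward
-- ===== SOURCE A (Python) =====
-- def init_list_of_objects(size):
--     list_of_objects = list()
--     for i in range(0, size):
--         list_of_objects.append(list())
--     return list_of_objects
--
-- def convert_forward_gaz_to_backward(forward_gaz):
--     length = len(forward_gaz)
--     backward_gaz = init_list_of_objects(length)
--     for idx in range(length):
--         if forward_gaz[idx]:
--             assert (len(forward_gaz[idx]) == 3)
--             num = len(forward_gaz[idx][0])
--             for idy in range(num):
--                 the_id = forward_gaz[idx][0][idy]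
--                 the_length = forward_gaz[idx][1][idy]
--                 type = forward_gaz[idx][2][idy]
--                 new_pos = idx + the_length - 1
--                 if backward_gaz[new_pos]:
--                     backward_gaz[new_pos][0].append(the_id)
--                     backward_gaz[new_pos][1].append(the_length)
--                     backward_gaz[new_pos][2].append(type)
--                 else:
--                     backward_gaz[new_pos] = [[the_id], [the_length],[type]]
--     return backward_gaz
-- ===== SOURCE B (Python) =====
-- def convert_forward_gaz_to_backward(forward_gaz):
--     # Phase 1: flatten every match into a (new_pos, id, length, type) event.
--     flat = []
--     for idx, entry in enumerate(forward_gaz):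
--         if entry:
--             assert (len(entry) == 3)
--             for the_id, the_length, typ in zip(entry[0], entry[1], entry[2]):
--                 flat.append((idx + the_length - 1, the_id, the_length, typ))
--     # Phase 2: gather — each output slot filters its own events out of the flat list.
--     def bucket(pos):
--         run = [t for t in flat if t[0] == pos]
--         if not run:
--             return []
--         return [[t[1] for t in run], [t[2] for t in run], [t[3] for t in run]]
--     return [bucket(pos) for pos in range(len(forward_gaz))]
-- ===== Notes on version B (the rewrite author's own statement) =====
-- stated objective: alternative
-- what changed: Replaces A's scatter (mutating a pre-allocated bucket list with a create-or-append branch) by a flatten-then-gather pass: one loop emits a flat list of (new_pos,id,length,type) events, then each output position is built independently by filtering its own events out of that list; trades A's O(m+n) scatter for an O(n*m) gather with no in-place mutation.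
-- outside the precondition, e.g. on convert_forward_gaz_to_backward([[[5], [0], [7]], []]): A returns [[], [[5], [0], [7]]], B returns [[], []]
import Mathlib
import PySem

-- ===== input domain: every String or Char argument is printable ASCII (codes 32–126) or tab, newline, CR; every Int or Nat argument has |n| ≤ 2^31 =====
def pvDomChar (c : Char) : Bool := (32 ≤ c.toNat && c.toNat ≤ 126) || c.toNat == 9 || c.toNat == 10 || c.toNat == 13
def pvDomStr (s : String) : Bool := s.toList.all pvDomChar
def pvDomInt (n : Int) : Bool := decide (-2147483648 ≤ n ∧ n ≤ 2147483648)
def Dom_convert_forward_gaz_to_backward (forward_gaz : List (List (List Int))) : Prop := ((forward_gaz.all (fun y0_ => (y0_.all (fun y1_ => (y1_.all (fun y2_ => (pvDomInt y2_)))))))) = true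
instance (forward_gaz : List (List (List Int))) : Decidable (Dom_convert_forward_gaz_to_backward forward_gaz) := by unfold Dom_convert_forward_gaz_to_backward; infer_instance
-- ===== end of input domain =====

-- B is a flatten-then-gather rewrite (emit a flat event list, then each output slot filters its own
-- events) instead of A's in-place scatter into a pre-allocated bucket list; neither mutates its argument.

-- ===== PORT A =====
def init_list_of_objects (size : Int) : List (List (List Int)) :=
  (PySem.List.pyRange 0 size 1).foldl (fun list_of_objects _ => list_of_objects ++ [[]]) []

-- inner-loop body of A (one idy step); pyGetD is exact under Pre_ (indices in range there)
def pvAInner (idx : Int) (entry : List (List Int))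
    (backward_gaz : List (List (List Int))) (idy : Int) : List (List (List Int)) :=
  let the_id := PySem.List.pyGetD (PySem.List.pyGetD entry 0 []) idy 0
  let the_length := PySem.List.pyGetD (PySem.List.pyGetD entry 1 []) idy 0
  let type := PySem.List.pyGetD (PySem.List.pyGetD entry 2 []) idy 0
  let new_pos := idx + the_length - 1
  let bucket := PySem.List.pyGetD backward_gaz new_pos []
  if bucket ≠ [] then
    PySem.List.pySetD backward_gaz new_pos
      [PySem.List.pyGetD bucket 0 [] ++ [the_id],
       PySem.List.pyGetD bucket 1 [] ++ [the_length],
       PySem.List.pyGetD bucket 2 [] ++ [type]]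
  else
    PySem.List.pySetD backward_gaz new_pos [[the_id], [the_length], [type]]

-- outer-loop body of A (one idx step); Python's 'assert len == 3' raises only outside Pre_
def pvAOuter (forward_gaz : List (List (List Int)))
    (backward_gaz : List (List (List Int))) (idx : Int) : List (List (List Int)) :=
  let entry := PySem.List.pyGetD forward_gaz idx []
  if entry ≠ [] then
    let num : Int := (PySem.List.pyGetD entry 0 []).length
    (PySem.List.pyRange 0 num 1).foldl (pvAInner idx entry) backward_gaz
  else backward_gaz

def convert_forward_gaz_to_backward (forward_gaz : List (List (List Int))) : List (List (List Int)) :=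
  let length : Int := forward_gaz.length
  let backward_gaz := init_list_of_objects length
  (PySem.List.pyRange 0 length 1).foldl (pvAOuter forward_gaz) backward_gaz

-- ===== PORT B =====
-- phase 1, inner append: one (new_pos, id, length, type) event per zipped triple
def pvFlatStep (idx : Int) (acc : List (Int × Int × Int × Int)) (t : Int × Int × Int) :
    List (Int × Int × Int × Int) :=
  acc ++ [(idx + t.2.1 - 1, t.1, t.2.1, t.2.2)]

-- phase 1, outer body (one enumerate step); the assert raises only outside Pre_
def pvFlatOuter (acc : List (Int × Int × Int × Int)) (p : Int × List (List Int)) :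
    List (Int × Int × Int × Int) :=
  if p.2 = [] then acc
  else ((PySem.List.pyGetD p.2 0 []).zip
      ((PySem.List.pyGetD p.2 1 []).zip (PySem.List.pyGetD p.2 2 []))).foldl (pvFlatStep p.1) acc

def pvFlat (forward_gaz : List (List (List Int))) : List (Int × Int × Int × Int) :=
  (PySem.List.enumerate forward_gaz 0).foldl pvFlatOuter []

-- phase 2: one output slot = the filter of its own events out of the flat list
def pvBucket (flat : List (Int × Int × Int × Int)) (pos : Int) : List (List Int) :=
  let run := flat.filter (fun t => t.1 == pos)
  if run = [] then []
  else [run.map (fun t => t.2.1), run.map (fun t => t.2.2.1), run.map (fun t => t.2.2.2)]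

def convert_forward_gaz_to_backward_alt (forward_gaz : List (List (List Int))) : List (List (List Int)) :=
  let flat := pvFlat forward_gaz
  (PySem.List.pyRange 0 (forward_gaz.length : Int) 1).map (fun pos => pvBucket flat pos)

-- ===== PRECONDITION & SPEC =====
-- Pre_ excludes inputs on which A raises (a nonempty cell without exactly 3 rows, an id row longer
-- than the length/type rows, or a match length putting new_pos at or past the end) and inputs whose
-- nonpositive match length makes new_pos negative, where A's negative-index wraparound write into a
-- bucket counted from the end is an accidental artefact; B drops such entries.
def Pre_convert_forward_gaz_to_backward (forward_gaz : List (List (List Int))) : Prop :=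
  ∀ i : Nat, i < forward_gaz.length →
    forward_gaz.getD i [] ≠ [] →
      (forward_gaz.getD i []).length = 3 ∧
      ∀ j : Nat, j < ((forward_gaz.getD i []).getD 0 []).length →
        j < ((forward_gaz.getD i []).getD 1 []).length ∧
        j < ((forward_gaz.getD i []).getD 2 []).length ∧
        0 ≤ (i : Int) + ((forward_gaz.getD i []).getD 1 []).getD j 0 - 1 ∧
        (i : Int) + ((forward_gaz.getD i []).getD 1 []).getD j 0 - 1 < (forward_gaz.length : Int)
instance (forward_gaz : List (List (List Int))) : Decidable (Pre_convert_forward_gaz_to_backward forward_gaz) := by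
  unfold Pre_convert_forward_gaz_to_backward; infer_instance

def pvWitness_convert_forward_gaz_to_backward : List (List (List Int)) := [[[10], [2], [5]], []]

def Spec_convert_forward_gaz_to_backward (forward_gaz : List (List (List Int))) (out : List (List (List Int))) : Prop := out = convert_forward_gaz_to_backward_alt forward_gaz
instance (forward_gaz : List (List (List Int))) (out : List (List (List Int))) : Decidable (Spec_convert_forward_gaz_to_backward forward_gaz out) := by unfold Spec_convert_forward_gaz_to_backward; infer_instance

-- ===== CLAIM (what is proved, stated in full; the proofs are below) =====
def Claim_equal_convert_forward_gaz_to_backward : Prop := ∀ (forward_gaz : List (List (List Int))), Dom_convert_forward_gaz_to_backward forward_gaz → Pre_convert_forward_gaz_to_backward forward_gaz → Spec_convert_forward_gaz_to_backward forward_gaz (convert_forward_gaz_to_backward forward_gaz)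

-- ===== LEMMAS AND PROOFS =====

-- A's inner step with the three row reads replaced by an already-fetched triple
def pvAStep (idx : Int) (bg : List (List (List Int))) (t : Int × Int × Int) :
    List (List (List Int)) :=
  let new_pos := idx + t.2.1 - 1
  let bucket := PySem.List.pyGetD bg new_pos []
  if bucket ≠ [] then
    PySem.List.pySetD bg new_pos
      [PySem.List.pyGetD bucket 0 [] ++ [t.1],
       PySem.List.pyGetD bucket 1 [] ++ [t.2.1],
       PySem.List.pyGetD bucket 2 [] ++ [t.2.2]]
  else
    PySem.List.pySetD bg new_pos [[t.1], [t.2.1], [t.2.2]]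

-- A's inner step keyed by the precomputed event
def pvA4 (bg : List (List (List Int))) (u : Int × Int × Int × Int) : List (List (List Int)) :=
  let bucket := PySem.List.pyGetD bg u.1 []
  if bucket ≠ [] then
    PySem.List.pySetD bg u.1
      [PySem.List.pyGetD bucket 0 [] ++ [u.2.1],
       PySem.List.pyGetD bucket 1 [] ++ [u.2.2.1],
       PySem.List.pyGetD bucket 2 [] ++ [u.2.2.2]]
  else
    PySem.List.pySetD bg u.1 [[u.2.1], [u.2.2.1], [u.2.2.2]]

-- the events a single cell contributes
def pvSeg (entry : List (List Int)) (idx : Int) : List (Int × Int × Int × Int) :=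
  if entry = [] then []
  else ((PySem.List.pyGetD entry 0 []).zip
      ((PySem.List.pyGetD entry 1 []).zip (PySem.List.pyGetD entry 2 []))).map
      (fun t => (idx + t.2.1 - 1, t.1, t.2.1, t.2.2))

-- the state invariant: every bucket is the rendered filter of the processed events
def pvInv (n : Nat) (pre : List (Int × Int × Int × Int)) (bg : List (List (List Int))) : Prop :=
  bg.length = n ∧ ∀ p : Nat, p < n → bg.getD p [] = pvBucket pre (p : Int)

theorem pvInit (n : Nat) :
    init_list_of_objects (n : Int) = List.replicate n ([] : List (List Int)) := by
  have h : ∀ (m : Nat) (acc : List (List (List Int))),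
      (List.range m).foldl (fun a _ => a ++ [[]]) acc = acc ++ List.replicate m [] := by
    intro m
    induction m with
    | zero => simp
    | succ k ih =>
      intro acc
      rw [List.range_succ, List.foldl_append]
      simp [ih, List.replicate_succ']
  simp [init_list_of_objects, PySem.List.pyRange_one, List.foldl_map, h]

-- generic bridge: an index loop over three parallel rows is a fold over their zip
theorem pvBridge {σ : Type} (F : σ → Int → Int → Int → σ) :
    ∀ (e0 e1 e2 : List Int) (s : σ), e0.length ≤ e1.length → e0.length ≤ e2.length →
    (List.range e0.length).foldl
        (fun s k => F s (e0.getD k 0) (e1.getD k 0) (e2.getD k 0)) s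
      = (e0.zip (e1.zip e2)).foldl (fun s t => F s t.1 t.2.1 t.2.2) s := by
  intro e0
  induction e0 with
  | nil => intro e1 e2 s _ _; simp
  | cons a e0' ih =>
    intro e1 e2 s h1 h2
    match e1, e2 with
    | [], _ => simp at h1
    | _ :: _, [] => simp at h2
    | b :: e1', c :: e2' =>
      rw [List.length_cons, List.range_succ_eq_map]
      simp only [List.foldl_cons, List.foldl_map, List.getD_cons_zero, List.getD_cons_succ,
        List.zip_cons_cons]
      exact ih e1' e2' (F s a b c) (by simpa using h1) (by simpa using h2)

theorem pvAInnerFold (idx : Int) (entry : List (List Int)) (bg : List (List (List Int)))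
    (h1 : (PySem.List.pyGetD entry 0 []).length ≤ (PySem.List.pyGetD entry 1 []).length)
    (h2 : (PySem.List.pyGetD entry 0 []).length ≤ (PySem.List.pyGetD entry 2 []).length) :
    (PySem.List.pyRange 0 ((PySem.List.pyGetD entry 0 []).length : Int) 1).foldl
        (pvAInner idx entry) bg
      = ((PySem.List.pyGetD entry 0 []).zip
          ((PySem.List.pyGetD entry 1 []).zip (PySem.List.pyGetD entry 2 []))).foldl
          (pvAStep idx) bg := by
  have hfun : (fun (s : List (List (List Int))) (k : Nat) => pvAInner idx entry s ((0 : Int) + k))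
      = fun s k => pvAStep idx s ((PySem.List.pyGetD entry 0 []).getD k 0,
          (PySem.List.pyGetD entry 1 []).getD k 0, (PySem.List.pyGetD entry 2 []).getD k 0) := by
    funext s k
    simp [pvAInner, pvAStep]
  have key := pvBridge (fun s a b c => pvAStep idx s (a, b, c))
      (PySem.List.pyGetD entry 0 []) (PySem.List.pyGetD entry 1 []) (PySem.List.pyGetD entry 2 [])
      bg h1 h2
  rw [PySem.List.pyRange_one]
  simp only [sub_zero, Int.toNat_natCast, List.foldl_map]
  rw [hfun]
  simpa using key

theorem pvMemZip (e0 e1 e2 : List Int) (t : Int × Int × Int)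
    (ht : t ∈ e0.zip (e1.zip e2)) :
    ∃ j : Nat, j < e0.length ∧ t.2.1 = e1.getD j 0 := by
  induction e0 generalizing e1 e2 with
  | nil => simp at ht
  | cons a e0' ih =>
    match e1, e2 with
    | [], _ => simp at ht
    | _ :: _, [] => simp at ht
    | b :: e1', c :: e2' =>
      rw [List.zip_cons_cons, List.zip_cons_cons, List.mem_cons] at ht
      rcases ht with h | h
      · exact ⟨0, by simp, by simp [h]⟩
      · obtain ⟨j, hj, he⟩ := ih e1' e2' h
        exact ⟨j + 1, by simpa using hj, by simpa using he⟩

theorem pvGetD_set (l : List (List (List Int))) (i j : Nat) (v : List (List Int))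
    (h : i < l.length) :
    (l.set i v).getD j [] = if j = i then v else l.getD j [] := by
  by_cases hj : j = i
  · subst hj
    simp [List.getD_eq_getElem?_getD, h]
  · simp [List.getD_eq_getElem?_getD, hj, Ne.symm hj]

-- one pvA4 step extends the invariant by one processed event
theorem pvInvStep (n : Nat) (pre : List (Int × Int × Int × Int)) (bg : List (List (List Int)))
    (u : Int × Int × Int × Int) (hrel : pvInv n pre bg)
    (h0 : 0 ≤ u.1) (h1 : u.1 < (n : Int)) :
    pvInv n (pre ++ [u]) (pvA4 bg u) := by
  obtain ⟨hlen, hinv⟩ := hrel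
  have hkn : ((u.1.toNat : Nat) : Int) = u.1 := Int.toNat_of_nonneg h0
  have hlt : u.1.toNat < n := by omega
  have hbucket : PySem.List.pyGetD bg u.1 [] = bg.getD u.1.toNat [] :=
    PySem.List.pyGetD_of_nonneg bg [] h0
  have hset : ∀ v : List (List Int), PySem.List.pySetD bg u.1 v = bg.set u.1.toNat v := by
    intro v; exact PySem.List.pySetD_of_nonneg bg v h0
  have hfilter : ∀ q : Int, (pre ++ [u]).filter (fun t => t.1 == q)
      = pre.filter (fun t => t.1 == q) ++ if u.1 = q then [u] else [] := by
    intro q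
    rw [List.filter_append]
    congr 1
    by_cases hq : u.1 = q
    · simp [List.filter, hq]
    · have hq' : (u.1 == q) = false := by simpa using hq
      simp [List.filter, hq', hq]
  have hb : bg.getD u.1.toNat [] = pvBucket pre u.1 := by
    rw [hinv u.1.toNat hlt, hkn]
  constructor
  · simp only [pvA4]
    split <;> rw [hset, List.length_set, hlen]
  · intro p hp
    by_cases hpk : p = u.1.toNat
    · have hpi : (p : Int) = u.1 := by rw [hpk, hkn]
      rw [hpi]
      set run := pre.filter (fun t => t.1 == u.1) with hrun
      have hfu : (pre ++ [u]).filter (fun t => t.1 == u.1) = run ++ [u] := by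
        rw [hfilter u.1, if_pos rfl]
      by_cases hre : run = []
      · -- fresh bucket
        have hbe : PySem.List.pyGetD bg u.1 [] = [] := by
          rw [hbucket, hb]; simp [pvBucket, ← hrun, hre]
        simp only [pvA4, hbe, ne_eq, not_true_eq_false, if_false]
        rw [hset, hpk, pvGetD_set bg u.1.toNat u.1.toNat _ (by omega), if_pos rfl]
        simp [pvBucket, hfu, hre]
      · -- existing bucket: append to all three rows
        have hbne : PySem.List.pyGetD bg u.1 []
            = [run.map (fun t => t.2.1), run.map (fun t => t.2.2.1),
               run.map (fun t => t.2.2.2)] := by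
          rw [hbucket, hb]; simp [pvBucket, ← hrun, hre]
        simp only [pvA4, hbne, ne_eq, reduceCtorEq, not_false_eq_true, if_true]
        rw [hset, hpk, pvGetD_set bg u.1.toNat u.1.toNat _ (by omega), if_pos rfl]
        simp [pvBucket, hfu, hre, PySem.List.pyGetD]
    · have hne : u.1 ≠ (p : Int) := by
        intro h; apply hpk; omega
      have hbp : pvBucket (pre ++ [u]) (p : Int) = pvBucket pre (p : Int) := by
        simp only [pvBucket]
        rw [hfilter (p : Int), if_neg hne, List.append_nil]
      have hget : (pvA4 bg u).getD p [] = bg.getD p [] := by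
        simp only [pvA4]
        split <;> rw [hset, pvGetD_set bg u.1.toNat p _ (by omega), if_neg hpk]
      rw [hget, hbp, hinv p hp]

theorem pvInvFold (n : Nat) (suf : List (Int × Int × Int × Int)) :
    ∀ (pre : List (Int × Int × Int × Int)) (bg : List (List (List Int))),
    pvInv n pre bg → (∀ u ∈ suf, 0 ≤ u.1 ∧ u.1 < (n : Int)) →
    pvInv n (pre ++ suf) (suf.foldl pvA4 bg) := by
  induction suf with
  | nil => intro pre bg hrel _; simpa using hrel
  | cons u suf ih =>
    intro pre bg hrel hb
    have step := pvInvStep n pre bg u hrel (hb u (by simp)).1 (hb u (by simp)).2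
    have := ih (pre ++ [u]) _ step (fun v hv => hb v (by simp [hv]))
    simpa using this

-- phase 1 of B produces exactly the concatenated segments
theorem pvFlatOuter_eq (acc : List (Int × Int × Int × Int)) (p : Int × List (List Int)) :
    pvFlatOuter acc p = acc ++ pvSeg p.2 p.1 := by
  unfold pvFlatOuter pvSeg pvFlatStep
  by_cases hp : p.2 = []
  · simp [hp]
  · rw [if_neg hp, if_neg hp, PySem.List.foldl_append_singleton_eq_map]

theorem pvFlat_eq (fg : List (List (List Int))) :
    pvFlat fg = (PySem.List.pyRange 0 (fg.length : Int) 1).flatMap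
      (fun i => pvSeg (PySem.List.pyGetD fg i []) i) := by
  unfold pvFlat
  rw [PySem.List.enumerate_eq_map_pyRange fg ([] : List (List Int))]
  have hfun : pvFlatOuter = fun acc p => acc ++ pvSeg p.2 p.1 := by
    funext acc p; exact pvFlatOuter_eq acc p
  rw [hfun]
  simp only [PySem.List.len_eq, List.foldl_map]
  rw [show (fun (acc : List (Int × Int × Int × Int)) (i : Int) =>
      acc ++ pvSeg (PySem.List.pyGetD fg i []) i)
    = fun acc i => acc ++ (fun j => pvSeg (PySem.List.pyGetD fg j []) j) i from rfl]
  rw [PySem.List.foldl_append_eq_flatMap]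
  simp

-- A's whole loop is the fold of pvA4 over the same event list
theorem pvAOuter_seg (fg : List (List (List Int))) (idx : Int)
    (bg : List (List (List Int))) (hpre : Pre_convert_forward_gaz_to_backward fg)
    (h0 : 0 ≤ idx) (h1 : idx < (fg.length : Int)) :
    pvAOuter fg bg idx = (pvSeg (PySem.List.pyGetD fg idx []) idx).foldl pvA4 bg := by
  set i := idx.toNat with hid
  have hi : (i : Int) = idx := Int.toNat_of_nonneg h0
  have hilt : i < fg.length := by omega
  have hentry : PySem.List.pyGetD fg idx [] = fg.getD i [] := by
    rw [← hi, PySem.List.pyGetD_natCast]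
  by_cases he : fg.getD i [] = []
  · have he' : fg[i]?.getD [] = ([] : List (List Int)) := by
      simpa [List.getD_eq_getElem?_getD] using he
    simp [pvAOuter, pvSeg, hentry, he']
  · obtain ⟨hlen3, hj⟩ := hpre i hilt he
    obtain ⟨r0, r1, r2, hr⟩ : ∃ r0 r1 r2, fg.getD i [] = [r0, r1, r2] := by
      match hm : fg.getD i [], hlen3 with
      | [r0, r1, r2], _ => exact ⟨r0, r1, r2, rfl⟩
    rw [hr] at hj
    simp only [List.getD_cons_zero, List.getD_cons_succ] at hj
    have h01 : r0.length ≤ r1.length := by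
      by_contra hcon
      exact absurd (hj r1.length (by omega)).1 (by omega)
    have h02 : r0.length ≤ r2.length := by
      by_contra hcon
      exact absurd (hj r2.length (by omega)).2.1 (by omega)
    have hrows0 : PySem.List.pyGetD (fg.getD i []) 0 ([] : List Int) = r0 := by rw [hr]; rfl
    have hrows1 : PySem.List.pyGetD (fg.getD i []) 1 ([] : List Int) = r1 := by rw [hr]; rfl
    have hrows2 : PySem.List.pyGetD (fg.getD i []) 2 ([] : List Int) = r2 := by rw [hr]; rfl
    have hne : fg.getD i [] ≠ [] := he
    simp only [pvAOuter, pvSeg, hentry, if_pos hne, if_neg hne]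
    rw [pvAInnerFold idx (fg.getD i []) bg (by rw [hrows0, hrows1]; exact h01)
        (by rw [hrows0, hrows2]; exact h02)]
    rw [hrows0, hrows1, hrows2, List.foldl_map]
    rfl

theorem pvAFold_flat (fg : List (List (List Int))) (l : List Int)
    (hpre : Pre_convert_forward_gaz_to_backward fg) :
    ∀ bg : List (List (List Int)), (∀ x ∈ l, 0 ≤ x ∧ x < (fg.length : Int)) →
    l.foldl (pvAOuter fg) bg
      = (l.flatMap (fun i => pvSeg (PySem.List.pyGetD fg i []) i)).foldl pvA4 bg := by
  induction l with
  | nil => intro bg _; simp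
  | cons x l ih =>
    intro bg hb
    rw [List.foldl_cons, List.flatMap_cons, List.foldl_append,
      pvAOuter_seg fg x bg hpre (hb x (by simp)).1 (hb x (by simp)).2]
    exact ih _ (fun u hu => hb u (by simp [hu]))

-- every event's key lies in [0, n) under Pre_
theorem pvFlatBounds (fg : List (List (List Int))) (hpre : Pre_convert_forward_gaz_to_backward fg)
    (u : Int × Int × Int × Int) (hu : u ∈ pvFlat fg) :
    0 ≤ u.1 ∧ u.1 < (fg.length : Int) := by
  rw [pvFlat_eq, List.mem_flatMap] at hu
  obtain ⟨i, hi, hui⟩ := hu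
  obtain ⟨h0, h1⟩ := PySem.List.mem_pyRange_one.mp hi
  set k := i.toNat with hkd
  have hk : (k : Int) = i := Int.toNat_of_nonneg h0
  have hklt : k < fg.length := by omega
  have hentry : PySem.List.pyGetD fg i [] = fg.getD k [] := by
    rw [← hk, PySem.List.pyGetD_natCast]
  rw [hentry] at hui
  by_cases he : fg.getD k [] = []
  · rw [pvSeg, if_pos he] at hui
    simp at hui
  · obtain ⟨hlen3, hj⟩ := hpre k hklt he
    obtain ⟨r0, r1, r2, hr⟩ : ∃ r0 r1 r2, fg.getD k [] = [r0, r1, r2] := by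
      match hm : fg.getD k [], hlen3 with
      | [r0, r1, r2], _ => exact ⟨r0, r1, r2, rfl⟩
    rw [hr] at hj
    simp only [List.getD_cons_zero, List.getD_cons_succ] at hj
    rw [pvSeg, if_neg (by rw [hr]; simp), hr] at hui
    simp only [List.mem_map] at hui
    obtain ⟨t, ht, hut⟩ := hui
    obtain ⟨j, hjlt, hje⟩ := pvMemZip r0 r1 r2 t (by simpa [PySem.List.pyGetD] using ht)
    have hb := (hj j hjlt).2.2
    rw [← hut]
    have hu1 : (i + t.2.1 - 1, t.1, t.2.1, t.2.2).1 = i + r1.getD j 0 - 1 := by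
      simp [hje]
    rw [hu1, ← hk]
    exact ⟨hb.1, hb.2⟩

-- ===== VERDICT (by name: the statement is the Claim_ definition above) =====
theorem convert_forward_gaz_to_backward_spec : Claim_equal_convert_forward_gaz_to_backward := by
  intro fg _ hpre
  show convert_forward_gaz_to_backward fg = convert_forward_gaz_to_backward_alt fg
  have hinv0 : pvInv fg.length [] (List.replicate fg.length ([] : List (List Int))) := by
    refine ⟨List.length_replicate, fun p hp => ?_⟩
    simp [List.getD_eq_getElem?_getD, hp, pvBucket]
  have hA : convert_forward_gaz_to_backward fg
      = (pvFlat fg).foldl pvA4 (List.replicate fg.length []) := by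
    simp only [convert_forward_gaz_to_backward, pvInit]
    rw [pvAFold_flat fg _ hpre _ (fun x hx => PySem.List.mem_pyRange_one.mp hx), ← pvFlat_eq]
  have hinvF : pvInv fg.length (pvFlat fg) ((pvFlat fg).foldl pvA4 (List.replicate fg.length [])) := by
    have := pvInvFold fg.length (pvFlat fg) [] _ hinv0 (pvFlatBounds fg hpre)
    simpa using this
  rw [hA]
  simp only [convert_forward_gaz_to_backward_alt]
  apply List.ext_getElem
  · rw [hinvF.1]
    simp [PySem.List.length_pyRange_one]
  · intro k h1 h2
    have hk : k < fg.length := by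
      have := hinvF.1; omega
    rw [List.getElem_map, PySem.List.getElem_pyRange_one]
    rw [← List.getD_eq_getElem _ [] h1, hinvF.2 k hk]
    norm_num
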